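-- pv_equiv track=rewrite | github.com/joeldanieldsouza8/DSA | HashTable/LeetCode/item_in_common.py | item_in_common
-- ===== SOURCE A (Python) =====
-- def item_in_common(list1: list[int], list2: list[int]):
--     # Create a dictionary to store elements from the first list
--     elements = {}
--
--     # Add all elements of list1 to the dictionary
--     for item in list1:
--         elements[item] = True
--
--     # Check if any element of list2 exists in the dictionary
--     for item in list2:
--         if item in elements:
--             return True
--
--     return False
-- ===== SOURCE B (Python) =====
-- def item_in_common(list1: list[int], list2: list[int]):
--     a = sorted(list1)
--     b = sorted(list2)
--     i = 0
--     j = 0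
--     while i < len(a) and j < len(b):
--         if a[i] == b[j]:
--             return True
--         if a[i] < b[j]:
--             i += 1
--         else:
--             j += 1
--     return False
-- ===== Notes on version B (the rewrite author's own statement) =====
-- stated objective: alternative
-- what changed: Replaces the hash-table membership pass with sorting copies of both lists and a two-pointer merge scan that stops at the first equal pair.
import Mathlib
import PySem

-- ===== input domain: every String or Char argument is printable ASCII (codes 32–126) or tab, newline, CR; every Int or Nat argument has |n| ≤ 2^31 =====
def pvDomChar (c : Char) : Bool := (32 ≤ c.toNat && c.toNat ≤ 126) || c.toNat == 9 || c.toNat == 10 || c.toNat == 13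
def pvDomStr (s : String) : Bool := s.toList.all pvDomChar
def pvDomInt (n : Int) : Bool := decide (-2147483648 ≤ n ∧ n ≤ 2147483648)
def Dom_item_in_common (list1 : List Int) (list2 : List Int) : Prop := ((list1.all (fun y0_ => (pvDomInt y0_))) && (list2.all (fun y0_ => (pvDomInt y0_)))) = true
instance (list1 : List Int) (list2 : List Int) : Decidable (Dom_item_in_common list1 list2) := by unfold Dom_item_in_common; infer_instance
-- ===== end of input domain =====

-- B replaces A's hash-table membership pass by sorting copies of both lists and a
-- two-pointer merge scan (alternative decomposition; no speed claim).

-- ===== PORT A =====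
-- the second loop of A: for item in list2: if item in elements: return True; return False
def itemCheckLoop (elements : PySem.Dict Int Bool) : List Int → Bool
  | [] => false
  | item :: rest => if elements.contains item then true else itemCheckLoop elements rest

def item_in_common (list1 : List Int) (list2 : List Int) : Bool :=
  -- elements = {}; for item in list1: elements[item] = True
  let elements := list1.foldl (fun d item => d.insert item true) PySem.Dict.empty
  itemCheckLoop elements list2

-- ===== PORT B =====
-- the while loop of B, consuming the sorted copies from the two pointers onward
def twoPtr : List Int → List Int → Bool
  | x :: xs, y :: ys =>
      if x = y then true
      else if x < y then twoPtr xs (y :: ys)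
      else twoPtr (x :: xs) ys
  | _, _ => false

def item_in_common_alt (list1 : List Int) (list2 : List Int) : Bool :=
  twoPtr (PySem.List.sorted list1 (fun x => x) false)
         (PySem.List.sorted list2 (fun x => x) false)

-- ===== PRECONDITION & SPEC =====
def Spec_item_in_common (list1 : List Int) (list2 : List Int) (out : Bool) : Prop := out = item_in_common_alt list1 list2
instance (list1 : List Int) (list2 : List Int) (out : Bool) : Decidable (Spec_item_in_common list1 list2 out) := by unfold Spec_item_in_common; infer_instance

-- ===== CLAIM (what is proved, stated in full; the proofs are below) =====
def Claim_equal_item_in_common : Prop := ∀ (list1 : List Int) (list2 : List Int), Dom_item_in_common list1 list2 → Spec_item_in_common list1 list2 (item_in_common list1 list2)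

-- ===== LEMMAS AND PROOFS =====

-- the dict built by A's first loop contains exactly the elements of list1
theorem contains_foldl_insert (l : List Int) (d : PySem.Dict Int Bool) (y : Int) :
    (l.foldl (fun d item => d.insert item true) d).contains y = true ↔ y ∈ l ∨ d.contains y = true := by
  induction l generalizing d with
  | nil => simp
  | cons x xs ih =>
      simp only [List.foldl_cons, ih, PySem.Dict.contains_insert, List.mem_cons,
        Bool.or_eq_true, beq_iff_eq]
      tauto

theorem itemCheckLoop_iff (d : PySem.Dict Int Bool) (l : List Int) :
    itemCheckLoop d l = true ↔ ∃ x ∈ l, d.contains x = true := by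
  induction l with
  | nil => simp [itemCheckLoop]
  | cons x xs ih =>
      simp only [itemCheckLoop]
      split
      · next h => exact iff_of_true rfl ⟨x, List.mem_cons_self .., h⟩
      · next h =>
          rw [ih]
          constructor
          · rintro ⟨a, ha, hc⟩; exact ⟨a, List.mem_cons_of_mem _ ha, hc⟩
          · rintro ⟨a, ha, hc⟩
            rcases List.mem_cons.mp ha with rfl | ha'
            · exact absurd hc h
            · exact ⟨a, ha', hc⟩

theorem item_in_common_iff (l1 l2 : List Int) :
    item_in_common l1 l2 = true ↔ ∃ x, x ∈ l1 ∧ x ∈ l2 := by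
  simp only [item_in_common, itemCheckLoop_iff]
  constructor
  · rintro ⟨x, hx2, hx1⟩
    rcases (contains_foldl_insert l1 PySem.Dict.empty x).mp hx1 with h | h
    · exact ⟨x, h, hx2⟩
    · simp [PySem.Dict.contains_empty] at h
  · rintro ⟨x, hx1, hx2⟩
    exact ⟨x, hx2, (contains_foldl_insert l1 PySem.Dict.empty x).mpr (Or.inl hx1)⟩

theorem twoPtr_iff : ∀ (a b : List Int), a.Pairwise (· ≤ ·) → b.Pairwise (· ≤ ·) →
    (twoPtr a b = true ↔ ∃ x, x ∈ a ∧ x ∈ b) := by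
  intro a b
  induction a, b using twoPtr.induct with
  | case1 xs y ys =>
      intro _ _
      exact iff_of_true (by simp [twoPtr]) ⟨y, List.mem_cons_self .., List.mem_cons_self ..⟩
  | case2 x xs y ys hne hlt ih =>
      intro ha hb
      rcases List.pairwise_cons.mp ha with ⟨hxa, ha'⟩
      rcases List.pairwise_cons.mp hb with ⟨hyb, hb'⟩
      simp only [twoPtr, if_neg hne, if_pos hlt]
      rw [ih ha' hb]
      constructor
      · rintro ⟨z, hz1, hz2⟩
        exact ⟨z, List.mem_cons_of_mem _ hz1, hz2⟩
      · rintro ⟨z, hz1, hz2⟩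
        rcases List.mem_cons.mp hz1 with rfl | hz1'
        · rcases List.mem_cons.mp hz2 with h | h
          · exact absurd h hne
          · exact absurd (hyb z h) (by omega)
        · exact ⟨z, hz1', hz2⟩
  | case3 x xs y ys hne hge ih =>
      intro ha hb
      rcases List.pairwise_cons.mp ha with ⟨hxa, ha'⟩
      rcases List.pairwise_cons.mp hb with ⟨hyb, hb'⟩
      simp only [twoPtr, if_neg hne, if_neg hge]
      rw [ih ha hb']
      constructor
      · rintro ⟨z, hz1, hz2⟩
        exact ⟨z, hz1, List.mem_cons_of_mem _ hz2⟩
      · rintro ⟨z, hz1, hz2⟩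
        rcases List.mem_cons.mp hz2 with rfl | hz2'
        · rcases List.mem_cons.mp hz1 with h | h
          · exact absurd h.symm hne
          · have := hxa z h
            omega
        · exact ⟨z, hz1, hz2'⟩
  | case4 a b hshape =>
      intro _ _
      match a, b, hshape with
      | [], b, _ => simp [twoPtr]
      | x :: xs, [], _ => simp [twoPtr]
      | x :: xs, y :: ys, h => exact (h x xs y ys rfl rfl).elim

theorem item_in_common_alt_iff (l1 l2 : List Int) :
    item_in_common_alt l1 l2 = true ↔ ∃ x, x ∈ l1 ∧ x ∈ l2 := by
  have h := twoPtr_iff (PySem.List.sorted l1 (fun x => x) false) (PySem.List.sorted l2 (fun x => x) false)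
    (by simpa using PySem.List.sorted_pairwise l1 (fun x => x))
    (by simpa using PySem.List.sorted_pairwise l2 (fun x => x))
  simp only [item_in_common_alt, h, PySem.List.mem_sorted]

-- ===== VERDICT (by name: the statement is the Claim_ definition above) =====
theorem item_in_common_spec : Claim_equal_item_in_common := by
  intro l1 l2 _
  unfold Spec_item_in_common
  apply Bool.eq_iff_iff.mpr
  rw [item_in_common_iff, item_in_common_alt_iff]
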